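-- pv_equiv track=rewrite | github.com/sunman54/wagner_whitin | wagner_whitin.py | evaluate
-- ===== SOURCE A (Python) =====
-- def evaluate(demands, order_costs, holding_costs, solution):
--     assert sum(demands) == sum(solution)
--     assert len(demands) == len(solution) == len(order_costs) == len(holding_costs)
--
--     cost = 0
--     in_stock = 0
--     for t in range(len(demands)):
--
--         # Update stock and the cost of this order
--         in_stock += solution[t] - demands[t]
--         cost += order_costs[t] if solution[t] > 0 else 0
--
--         # Sell products, pay the price of bringing stock to next period
--         cost += in_stock * holding_costs[t]
--         assert in_stock >= 0
--
--     return cost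
-- ===== SOURCE B (Python) =====
-- def evaluate(demands, order_costs, holding_costs, solution):
--     assert sum(demands) == sum(solution)
--     assert len(demands) == len(solution) == len(order_costs) == len(holding_costs)
--
--     # Running stock levels: prefix sums of solution[t] - demands[t]
--     stocks = []
--     level = 0
--     for s, d in zip(solution, demands):
--         level += s - d
--         stocks.append(level)
--     assert all(st >= 0 for st in stocks)
--
--     order_cost = sum(oc for oc, s in zip(order_costs, solution) if s > 0)
--     holding_cost = sum(st * hc for st, hc in zip(stocks, holding_costs))
--     return order_cost + holding_cost
-- ===== Notes on version B (the rewrite author's own statement) =====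
-- stated objective: alternative
-- what changed: The fused stateful loop of A is decomposed into a prefix-sum pass computing the stock levels followed by two independent zip-and-sum reductions for order cost and holding cost; the assertions fire on the same inputs.
import Mathlib
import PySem

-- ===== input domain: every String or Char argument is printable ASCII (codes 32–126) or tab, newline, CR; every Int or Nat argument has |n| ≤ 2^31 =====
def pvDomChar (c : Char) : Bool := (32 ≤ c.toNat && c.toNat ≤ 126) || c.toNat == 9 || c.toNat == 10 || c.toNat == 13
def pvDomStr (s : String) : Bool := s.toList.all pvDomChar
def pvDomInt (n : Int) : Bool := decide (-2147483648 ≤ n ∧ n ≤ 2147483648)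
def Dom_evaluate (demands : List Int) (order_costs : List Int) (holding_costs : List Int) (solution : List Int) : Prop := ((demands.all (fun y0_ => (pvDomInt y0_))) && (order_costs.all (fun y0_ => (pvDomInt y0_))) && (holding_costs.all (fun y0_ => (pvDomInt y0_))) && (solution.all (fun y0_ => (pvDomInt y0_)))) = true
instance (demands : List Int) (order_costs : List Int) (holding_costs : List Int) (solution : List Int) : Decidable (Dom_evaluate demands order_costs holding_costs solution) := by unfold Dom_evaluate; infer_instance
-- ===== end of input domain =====

-- B replaces A's fused cost/stock loop by a prefix-sum pass plus two independent zip-and-sum reductions (objective: alternative decomposition, same cost).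

-- ===== PORT A =====
-- A's loop: state (cost, in_stock), one step per t in range(len(demands)).
def evaluate (demands : List Int) (order_costs : List Int) (holding_costs : List Int) (solution : List Int) : Int :=
  ((PySem.List.pyRange 0 (demands.length : Int) 1).foldl
    (fun (st : Int × Int) (t : Int) =>
      let in_stock := st.2 + (PySem.List.pyGetD solution t 0 - PySem.List.pyGetD demands t 0)
      let cost := st.1 + (if PySem.List.pyGetD solution t 0 > 0 then PySem.List.pyGetD order_costs t 0 else 0)
      let cost := cost + in_stock * PySem.List.pyGetD holding_costs t 0
      (cost, in_stock))
    (0, 0)).1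

-- ===== PORT B =====
-- B's first pass: running stock levels (prefix sums of solution[t] - demands[t]).
def prefixStocks : Int → List Int → List Int
  | _, [] => []
  | level, x :: xs => (level + x) :: prefixStocks (level + x) xs

def evaluate_alt (demands : List Int) (order_costs : List Int) (holding_costs : List Int) (solution : List Int) : Int :=
  let stocks := prefixStocks 0 (List.zipWith (fun s d => s - d) solution demands)
  let order_cost := (((order_costs.zip solution).filter (fun p => p.2 > 0)).map (fun p => p.1)).sum
  let holding_cost := ((stocks.zip holding_costs).map (fun p => p.1 * p.2)).sum
  order_cost + holding_cost

-- ===== PRECONDITION & SPEC =====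
-- Pre_ excludes exactly the inputs on which Python A raises AssertionError: mismatched totals,
-- mismatched lengths, or a running stock level that goes negative.
def Pre_evaluate (demands : List Int) (order_costs : List Int) (holding_costs : List Int) (solution : List Int) : Prop :=
  demands.sum = solution.sum ∧
  demands.length = solution.length ∧ demands.length = order_costs.length ∧ demands.length = holding_costs.length ∧
  ∀ k, k < demands.length → 0 ≤ (solution.take (k+1)).sum - (demands.take (k+1)).sum

instance (demands : List Int) (order_costs : List Int) (holding_costs : List Int) (solution : List Int) : Decidable (Pre_evaluate demands order_costs holding_costs solution) := by unfold Pre_evaluate; infer_instance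

def pvWitness_evaluate : List Int × List Int × List Int × List Int := ([1, 2, 0], [5, 5, 5], [1, 1, 1], [3, 0, 0])

def Spec_evaluate (demands : List Int) (order_costs : List Int) (holding_costs : List Int) (solution : List Int) (out : Int) : Prop := out = evaluate_alt demands order_costs holding_costs solution
instance (demands : List Int) (order_costs : List Int) (holding_costs : List Int) (solution : List Int) (out : Int) : Decidable (Spec_evaluate demands order_costs holding_costs solution out) := by unfold Spec_evaluate; infer_instance

-- ===== CLAIM (what is proved, stated in full; the proofs are below) =====
def Claim_equal_evaluate : Prop := ∀ (demands : List Int) (order_costs : List Int) (holding_costs : List Int) (solution : List Int), Dom_evaluate demands order_costs holding_costs solution → Pre_evaluate demands order_costs holding_costs solution → Spec_evaluate demands order_costs holding_costs solution (evaluate demands order_costs holding_costs solution)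

-- ===== LEMMAS AND PROOFS =====

-- A's indexed fold, re-expressed with Nat indices and List.getD.
theorem evaluate_loop_eq (demands order_costs holding_costs solution : List Int)
    (hs : demands.length = solution.length) (hoc : demands.length = order_costs.length)
    (hhc : demands.length = holding_costs.length) (c0 i0 : Int) :
    ((List.range demands.length).foldl
      (fun (st : Int × Int) (k : Nat) =>
        (st.1 + (if solution.getD k 0 > 0 then order_costs.getD k 0 else 0)
           + (st.2 + (solution.getD k 0 - demands.getD k 0)) * holding_costs.getD k 0,
         st.2 + (solution.getD k 0 - demands.getD k 0)))
      (c0, i0)).1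
    = c0 + (((order_costs.zip solution).filter (fun p => p.2 > 0)).map (fun p => p.1)).sum
        + (((prefixStocks i0 (List.zipWith (fun s d => s - d) solution demands)).zip holding_costs).map
            (fun p => p.1 * p.2)).sum := by
  induction demands generalizing order_costs holding_costs solution c0 i0 with
  | nil =>
    cases solution with
    | cons _ _ => simp at hs
    | nil =>
      cases order_costs with
      | cons _ _ => simp at hoc
      | nil =>
        cases holding_costs with
        | cons _ _ => simp at hhc
        | nil => simp [prefixStocks]
  | cons dh dt ih =>
    cases solution with
    | nil => simp at hs
    | cons sh st =>
      cases order_costs with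
      | nil => simp at hoc
      | cons oh ot =>
        cases holding_costs with
        | nil => simp at hhc
        | cons hh ht =>
          simp only [List.length_cons, List.range_succ_eq_map, List.foldl_cons, List.foldl_map,
            List.getD_cons_succ, List.getD_cons_zero, List.zipWith_cons_cons, prefixStocks,
            List.zip_cons_cons, List.filter_cons, List.map_cons, List.sum_cons]
          rw [ih ot ht st (by simpa using hs) (by simpa using hoc) (by simpa using hhc)]
          by_cases h : sh > 0 <;> simp [h] <;> ring

theorem evaluate_spec : Claim_equal_evaluate := by
  intro demands order_costs holding_costs solution _ hpre
  obtain ⟨-, hs, hoc, hhc, -⟩ := hpre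
  show evaluate demands order_costs holding_costs solution = evaluate_alt demands order_costs holding_costs solution
  unfold evaluate evaluate_alt
  rw [PySem.List.pyRange_one, List.foldl_map]
  simp only [Int.sub_zero, Int.toNat_natCast, zero_add, PySem.List.pyGetD_natCast]
  rw [evaluate_loop_eq demands order_costs holding_costs solution hs hoc hhc 0 0]
  ring
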